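-- pv_equiv track=rewrite | github.com/geniegeist/chipsplitting-game | chipsplitting/invertibility_criterion.py | phi_coefficients
-- ===== SOURCE A (Python) =====
-- import math
--
-- def ncr(n: int, r: int):
--     """
--     Compute the binomial coefficient n choose r.
--     """
--     f = math.factorial
--     return f(n) // f(r) // f(n - r)
--
-- def phi_coefficients(degree: int, unit: int) -> list[list[int]]:
--     """
--     Compute the coefficients of the diagonal Pascal equations
--
--     :param degree: The degree of the Pascal form.
--     :param unit: The unit of the Pascal form.
--     :return: A list of coefficients as a 2D list.
--     """
--     coefficients = []
--     for col in range(degree + 1):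
--         rows = []
--         for row in range(degree + 1 - col):
--             if unit - col >= 0 and degree - col - row >= unit - col:
--                 rows.append(ncr(degree - col - row, unit - col))
--             else:
--                 rows.append(0)
--         coefficients.append(rows)
--     return coefficients
-- ===== SOURCE B (Python) =====
-- def phi_coefficients(degree: int, unit: int) -> list[list[int]]:
--     # Build Pascal's triangle once (O(degree^2) adds) when it can be consulted,
--     # then emit each output row as a column slice of the triangle padded with zeros.
--     pascal = []
--     if 0 <= unit <= degree:
--         row = [1]
--         for _ in range(degree + 1):
--             pascal.append(row)
--             row = [1] + [a + b for a, b in zip(row, row[1:])] + [1]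
--
--     coefficients = []
--     for col in range(degree + 1):
--         m = degree - col
--         u = unit - col
--         if 0 <= u <= m:
--             coefficients.append([pascal[m - r][u] for r in range(m - u + 1)] + [0] * u)
--         else:
--             coefficients.append([0] * (m + 1))
--     return coefficients
-- ===== Notes on version B (the rewrite author's own statement) =====
-- stated objective: faster
-- what changed: Instead of recomputing three factorials and two big-int divisions per table entry, B builds Pascal's triangle once by additions and emits each output row as a padded column slice; intended as faster, measured ~3.5-4x on sampled sizes where both finish (both are output-bound on the very largest inputs).
import Mathlib
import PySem

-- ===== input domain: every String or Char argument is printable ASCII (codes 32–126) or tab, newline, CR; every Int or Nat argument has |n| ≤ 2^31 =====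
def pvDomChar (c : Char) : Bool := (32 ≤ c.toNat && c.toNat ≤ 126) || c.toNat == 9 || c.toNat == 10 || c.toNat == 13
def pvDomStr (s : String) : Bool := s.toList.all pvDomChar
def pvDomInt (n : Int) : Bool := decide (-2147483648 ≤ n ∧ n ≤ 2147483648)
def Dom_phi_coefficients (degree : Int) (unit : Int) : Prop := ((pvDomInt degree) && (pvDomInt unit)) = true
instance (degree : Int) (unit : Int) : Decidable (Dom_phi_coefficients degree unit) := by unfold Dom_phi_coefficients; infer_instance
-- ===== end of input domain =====

-- B replaces per-entry factorial arithmetic by one Pascal-triangle precomputation with O(1) lookups; intended as faster, measured ~3.5-4x on sampled sizes where both finish.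

-- ===== PORT A =====
-- math.factorial; exact for n ≥ 0 (A only ever calls it with n ≥ 0, guarded by the if)
def pvFact (n : Int) : Int := (Nat.factorial n.toNat : Int)

def ncr (n : Int) (r : Int) : Int :=
  PySem.Int.floordiv (PySem.Int.floordiv (pvFact n) (pvFact r)) (pvFact (n - r))

def phi_coefficients (degree : Int) (unit : Int) : List (List Int) :=
  (PySem.List.pyRange 0 (degree + 1) 1).foldl (fun coefficients col =>
    coefficients ++ [(PySem.List.pyRange 0 (degree + 1 - col) 1).foldl (fun rows row =>
      rows ++ [if unit - col ≥ 0 ∧ degree - col - row ≥ unit - col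
               then ncr (degree - col - row) (unit - col) else 0]) []]) []

-- ===== PORT B =====
-- the 'for _ in range(degree+1)' loop of Source B: emit the current row, then extend it by Pascal's rule
def pascalLoop : Nat → List Int → List (List Int)
  | 0, _ => []
  | k + 1, row =>
      row :: pascalLoop k ([1] ++ List.zipWith (· + ·) row (PySem.List.slice row (some 1) none) ++ [1])

def phi_coefficients_alt (degree : Int) (unit : Int) : List (List Int) :=
  let pascal := if 0 ≤ unit ∧ unit ≤ degree then pascalLoop (degree + 1).toNat [1] else []
  (PySem.List.pyRange 0 (degree + 1) 1).map (fun col =>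
    let m := degree - col
    let u := unit - col
    if 0 ≤ u ∧ u ≤ m then
      (PySem.List.pyRange 0 (m - u + 1) 1).map
        (fun r => (pascal.getD (m - r).toNat []).getD u.toNat 0)
        ++ List.replicate u.toNat 0
    else
      List.replicate (m + 1).toNat 0)

-- ===== PRECONDITION & SPEC =====
def Spec_phi_coefficients (degree : Int) (unit : Int) (out : List (List Int)) : Prop := out = phi_coefficients_alt degree unit
instance (degree : Int) (unit : Int) (out : List (List Int)) : Decidable (Spec_phi_coefficients degree unit out) := by unfold Spec_phi_coefficients; infer_instance

-- ===== CLAIM (what is proved, stated in full; the proofs are below) =====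
def Claim_equal_phi_coefficients : Prop := ∀ (degree : Int) (unit : Int), Dom_phi_coefficients degree unit → Spec_phi_coefficients degree unit (phi_coefficients degree unit)

-- ===== LEMMAS AND PROOFS =====

-- row m of Pascal's triangle, mathematically
def pascalRow (m : Nat) : List Int := (List.range (m + 1)).map (fun r => (m.choose r : Int))

theorem pascalRow_getD (m r : Nat) : (pascalRow m).getD r 0 = (m.choose r : Int) := by
  by_cases h : r < m + 1
  · simp [pascalRow, List.getD_eq_getElem?_getD, h]
  · have h2 : (List.range (m + 1))[r]? = none := List.getElem?_eq_none (by simp; omega)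
    simp [pascalRow, List.getD_eq_getElem?_getD, h2,
      Nat.choose_eq_zero_of_lt (show m < r by omega)]

theorem pascalRow_zip (m : Nat) : List.zipWith (· + ·) (pascalRow m) ((pascalRow m).tail)
      = (List.range m).map (fun r => (((m + 1).choose (r + 1) : Nat) : Int)) := by
  apply List.ext_getElem
  · simp [pascalRow]
  · intro i h1 h2
    rw [List.getElem_zipWith]
    simp [pascalRow, List.getElem_tail, Nat.choose_succ_succ' m i]

theorem pascalRow_step (m : Nat) :
    [1] ++ List.zipWith (· + ·) (pascalRow m) (PySem.List.slice (pascalRow m) (some 1) none) ++ [1]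
      = pascalRow (m + 1) := by
  rw [PySem.List.slice_from_one, pascalRow_zip]
  show _ = (List.range (m + 2)).map _
  rw [List.range_succ, List.map_append, List.range_succ_eq_map, List.map_cons, List.map_map]
  simp [Function.comp_def]

theorem pascalLoop_getD : ∀ (k m i : Nat), i < k →
    (pascalLoop k (pascalRow m)).getD i [] = pascalRow (m + i) := by
  intro k
  induction k with
  | zero => intro m i h; omega
  | succ k ih =>
    intro m i h
    cases i with
    | zero => simp [pascalLoop]
    | succ i =>
      rw [show pascalLoop (k + 1) (pascalRow m)
            = pascalRow m :: pascalLoop k (pascalRow (m + 1)) by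
          rw [pascalLoop, pascalRow_step]]
      rw [List.getD_cons_succ, ih (m + 1) i (by omega)]
      congr 1
      omega

theorem pascalRow_zero : pascalRow 0 = [1] := by decide

theorem ncr_eq_choose (n r : Int) (h0 : 0 ≤ r) (h1 : r ≤ n) :
    ncr n r = (n.toNat.choose r.toNat : Int) := by
  have hn : 0 ≤ n := le_trans h0 h1
  have hnr : (n - r).toNat = n.toNat - r.toNat := by omega
  have hr : r.toNat ≤ n.toNat := by omega
  simp only [ncr, pvFact, hnr]
  rw [PySem.Int.floordiv_natCast, PySem.Int.floordiv_natCast]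
  rw [Nat.div_div_eq_div_mul,
    ← Nat.choose_eq_factorial_div_factorial hr]

theorem map_zero_of_all (l : List Int) (f : Int → Int)
    (h : ∀ x ∈ l, f x = 0) : l.map f = List.replicate l.length 0 := by
  rw [List.map_congr_left h, List.map_const']

theorem row_eq (degree unit col : Int) (hc0 : 0 ≤ col) (hc1 : col < degree + 1) :
    (PySem.List.pyRange 0 (degree + 1 - col) 1).map
      (fun row => if unit - col ≥ 0 ∧ degree - col - row ≥ unit - col
        then ncr (degree - col - row) (unit - col) else 0)
    = (if 0 ≤ unit - col ∧ unit - col ≤ degree - col then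
        (PySem.List.pyRange 0 (degree - col - (unit - col) + 1) 1).map
          (fun r => (((if 0 ≤ unit ∧ unit ≤ degree then pascalLoop (degree + 1).toNat [1]
              else []).getD (degree - col - r).toNat []).getD (unit - col).toNat 0))
          ++ List.replicate (unit - col).toNat 0
      else List.replicate (degree - col + 1).toNat 0) := by
  set m := degree - col with hm
  set u := unit - col with hu
  by_cases h : 0 ≤ u ∧ u ≤ m
  · rw [if_pos h]
    have hpas : (if 0 ≤ unit ∧ unit ≤ degree then pascalLoop (degree + 1).toNat [1] else [])
        = pascalLoop (degree + 1).toNat [1] := if_pos (by omega)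
    rw [hpas]
    have hsplit : PySem.List.pyRange 0 (degree + 1 - col) 1
        = PySem.List.pyRange 0 (m - u + 1) 1 ++ PySem.List.pyRange (m - u + 1) (m + 1) 1 := by
      rw [show degree + 1 - col = m + 1 by omega]
      exact PySem.List.pyRange_one_append 0 (m - u + 1) (m + 1) (by omega) (by omega)
    rw [hsplit, List.map_append]
    congr 1
    · apply List.map_congr_left
      intro r hr
      rw [PySem.List.mem_pyRange_one] at hr
      have hg : u ≥ 0 ∧ m - r ≥ u := ⟨h.1, by omega⟩
      rw [if_pos ⟨hg.1, hg.2⟩]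
      have hlt : (m - r).toNat < (degree + 1).toNat := by omega
      rw [ncr_eq_choose _ _ h.1 (by omega), ← pascalRow_zero,
        pascalLoop_getD _ 0 _ hlt, Nat.zero_add, pascalRow_getD]
    · rw [map_zero_of_all _ _ (fun r hr => by
        rw [PySem.List.mem_pyRange_one] at hr
        rw [if_neg (by omega)]),
        PySem.List.length_pyRange_one]
      congr 1
      omega
  · rw [if_neg h]
    rw [map_zero_of_all _ _ (fun r hr => by
        rw [PySem.List.mem_pyRange_one] at hr
        rw [if_neg (by omega)]),
      PySem.List.length_pyRange_one]
    congr 1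
    omega

-- ===== VERDICT (by name: the statement is the Claim_ definition above) =====
theorem phi_coefficients_spec : Claim_equal_phi_coefficients := by
  intro degree unit _
  show phi_coefficients degree unit = phi_coefficients_alt degree unit
  unfold phi_coefficients phi_coefficients_alt
  simp only [PySem.List.foldl_append_singleton_eq_map, List.nil_append]
  apply List.map_congr_left
  intro col hcol
  rw [PySem.List.mem_pyRange_one] at hcol
  simpa using row_eq degree unit col hcol.1 hcol.2
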